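-- pv_equiv track=rewrite | github.com/Ebiquity/CASIE | code/tree.py | commonroot
-- ===== SOURCE A (Python) =====
-- def commonroot(parsetree,path):
--     for x in path:
--         for y in parsetree.keys():
--             if x in parsetree[y]:
--                 if y not in path:
--                     return x
--                 else:
--                     break
--         else:
--             return x
-- ===== SOURCE B (Python) =====
-- def commonroot(parsetree, path):
--     parent = {}
--     for y, children in parsetree.items():
--         for c in children:
--             parent.setdefault(c, y)
--     pathset = set(path)
--     for x in path:
--         p = parent.get(x)
--         if p is None or p not in pathset:
--             return x
--     return None
-- ===== Notes on version B (the rewrite author's own statement) =====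
-- stated objective: alternative
-- what changed: Instead of rescanning every dict key's child list for each path node, B precomputes a child-to-parent dict in one pass (first key wins, matching A's key order) and a path set, then answers each path node with two O(1) lookups; it trades A's early-exit rescans for a single upfront indexing pass.
import Mathlib
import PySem

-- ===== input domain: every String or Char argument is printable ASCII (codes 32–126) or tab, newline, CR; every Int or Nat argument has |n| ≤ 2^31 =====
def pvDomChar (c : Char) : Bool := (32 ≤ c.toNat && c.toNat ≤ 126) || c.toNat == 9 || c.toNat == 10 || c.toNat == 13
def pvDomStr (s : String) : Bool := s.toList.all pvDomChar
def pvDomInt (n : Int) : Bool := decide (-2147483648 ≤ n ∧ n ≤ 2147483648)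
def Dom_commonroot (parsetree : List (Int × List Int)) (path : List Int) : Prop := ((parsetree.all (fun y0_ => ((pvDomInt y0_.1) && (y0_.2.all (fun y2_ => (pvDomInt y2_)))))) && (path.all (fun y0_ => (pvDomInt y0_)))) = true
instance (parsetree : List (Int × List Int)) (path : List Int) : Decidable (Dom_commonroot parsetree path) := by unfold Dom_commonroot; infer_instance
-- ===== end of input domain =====

-- B replaces A's per-path-node rescan of every key's child list by a child→parent dict
-- built once (first key wins, as in A) plus a path set; objective: alternative algorithm.

-- ===== PORT A =====
-- inner 'for y in parsetree.keys(): …' loop of A, with its for-else clause; iterating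
-- the dict's items is exact for 'for y in keys: … parsetree[y] …' since dict keys are
-- unique and parsetree[y] is that key's value.
-- returns 'some x' where A returns x, 'none' where the loop breaks (continue outer loop)
def commonrootInner (items : List (Int × List Int)) (path : List Int) (x : Int) : Option Int :=
  match items with
  | [] => some x                                -- for-else: return x
  | (y, vs) :: rest =>
      if x ∈ vs then
        if y ∈ path then none else some x       -- break / return x
      else commonrootInner rest path x

-- outer 'for x in path' loop of A
def commonrootOuter (items : List (Int × List Int)) (path rem : List Int) : Option Int :=
  match rem with
  | [] => none                                  -- fell off the loop: implicit return None
  | x :: xs =>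
      match commonrootInner items path x with
      | some r => some r
      | none => commonrootOuter items path xs

def commonroot (parsetree : List (Int × List Int)) (path : List Int) : Option Int :=
  commonrootOuter (PySem.Dict.ofList parsetree).items path path

-- ===== PORT B =====
-- parent.setdefault(c, y) over all items/children
def commonrootParents (items : List (Int × List Int)) : PySem.Dict Int Int :=
  items.foldl (fun d p => p.2.foldl (fun d c => d.setdefault c p.1) d) PySem.Dict.empty

-- 'for x in path: p = parent.get(x); if p is None or p not in pathset: return x'
def commonrootScan (parent : PySem.Dict Int Int) (pathset : List Int) (rem : List Int) : Option Int :=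
  match rem with
  | [] => none
  | x :: xs =>
      match parent.get? x with
      | none => some x
      | some p => if p ∈ pathset then commonrootScan parent pathset xs else some x

def commonroot_alt (parsetree : List (Int × List Int)) (path : List Int) : Option Int :=
  let parent := commonrootParents (PySem.Dict.ofList parsetree).items
  let pathset := PySem.Set.ofList path
  commonrootScan parent pathset path

-- ===== PRECONDITION & SPEC =====
def Spec_commonroot (parsetree : List (Int × List Int)) (path : List Int) (out : Option Int) : Prop := out = commonroot_alt parsetree path
instance (parsetree : List (Int × List Int)) (path : List Int) (out : Option Int) : Decidable (Spec_commonroot parsetree path out) := by unfold Spec_commonroot; infer_instance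

-- ===== CLAIM (what is proved, stated in full; the proofs are below) =====
def Claim_equal_commonroot : Prop := ∀ (parsetree : List (Int × List Int)) (path : List Int), Dom_commonroot parsetree path → Spec_commonroot parsetree path (commonroot parsetree path)

-- ===== LEMMAS AND PROOFS =====

-- the first key y (in items order) whose child list contains x
def firstParent (items : List (Int × List Int)) (x : Int) : Option Int :=
  match items with
  | [] => none
  | (y, vs) :: rest => if x ∈ vs then some y else firstParent rest x

-- one child-list pass of B's build loop, as a lookup
lemma get_setdefault_fold (vs : List Int) (y : Int) (d : PySem.Dict Int Int) (x : Int) :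
    ((vs.foldl (fun d c => d.setdefault c y) d).get? x)
      = match d.get? x with
        | some v => some v
        | none => if x ∈ vs then some y else none := by
  induction vs generalizing d with
  | nil => cases h : d.get? x <;> simp [h]
  | cons c cs ih =>
    simp only [List.foldl_cons, ih]
    by_cases hc : d.contains c
    · rw [PySem.Dict.setdefault_of_contains _ _ hc]
      cases hd : d.get? x <;> simp [List.mem_cons]
      by_cases hxc : x = c
      · subst hxc
        rw [PySem.Dict.contains_eq_isSome_get?, hd] at hc; simp at hc
      · simp [hxc]
    · rw [PySem.Dict.setdefault_of_not_contains _ _ (by simpa using hc)]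
      by_cases hxc : x = c
      · subst hxc
        rw [PySem.Dict.get?_insert_self]
        have : d.get? x = none := by
          rw [PySem.Dict.contains_eq_isSome_get?] at hc
          cases h : d.get? x <;> simp [h] at hc ⊢
        simp [this]
      · rw [PySem.Dict.get?_insert_of_ne _ y hxc]
        cases hd : d.get? x <;> simp [List.mem_cons, hxc]

-- B's parent dict answers exactly A's inner scan: the first key whose list contains x
lemma get_parents (items : List (Int × List Int)) (d : PySem.Dict Int Int) (x : Int) :
    ((items.foldl (fun d p => p.2.foldl (fun d c => d.setdefault c p.1) d) d).get? x)
      = match d.get? x with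
        | some v => some v
        | none => firstParent items x := by
  induction items generalizing d with
  | nil => cases h : d.get? x <;> simp [h, firstParent]
  | cons p rest ih =>
    simp only [List.foldl_cons, ih, get_setdefault_fold]
    obtain ⟨y, vs⟩ := p
    cases hd : d.get? x
    · simp only [firstParent]
      by_cases hx : x ∈ vs <;> simp [hx]
    · simp

lemma parents_get (items : List (Int × List Int)) (x : Int) :
    (commonrootParents items).get? x = firstParent items x := by
  simp [commonrootParents, get_parents, PySem.Dict.get?_empty]

-- A's inner loop in terms of firstParent
lemma inner_eq (items : List (Int × List Int)) (path : List Int) (x : Int) :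
    commonrootInner items path x
      = match firstParent items x with
        | none => some x
        | some y => if y ∈ path then none else some x := by
  induction items with
  | nil => simp [commonrootInner, firstParent]
  | cons p rest ih =>
    obtain ⟨y, vs⟩ := p
    by_cases hx : x ∈ vs <;> simp [commonrootInner, firstParent, hx, ih]

-- the two outer loops agree step for step
lemma outer_eq_scan (items : List (Int × List Int)) (path rem : List Int) :
    commonrootOuter items path rem
      = commonrootScan (commonrootParents items) (PySem.Set.ofList path) rem := by
  induction rem with
  | nil => simp [commonrootOuter, commonrootScan]
  | cons x xs ih =>
    simp only [commonrootOuter, commonrootScan, inner_eq, parents_get]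
    cases h : firstParent items x with
    | none => simp
    | some y =>
      by_cases hy : y ∈ path <;>
        simp [hy, PySem.Set.mem_ofList, ih]

-- ===== VERDICT (by name: the statement is the Claim_ definition above) =====
theorem commonroot_spec : Claim_equal_commonroot := by
  intro parsetree path _
  show commonroot parsetree path = commonroot_alt parsetree path
  simp [commonroot, commonroot_alt, outer_eq_scan]
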